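-- pv_equiv track=rewrite | github.com/JuanYuriCPM/W3_Python_Puzzles | puzzle33.py | check_uppercase_index
-- ===== SOURCE A (Python) =====
-- def check_uppercase_index(target_string):
--     uppercase_vowels = 'AEIOU'
--     index_tracker = 0
--     list_of_indices = []
--     for i in target_string:
--         if i in uppercase_vowels and index_tracker % 2 == 0:
--             list_of_indices.append(index_tracker)
--         index_tracker += 1
--     return list_of_indices
-- ===== SOURCE B (Python) =====
-- def check_uppercase_index(target_string):
--     # Visit only even positions via slicing; map slice index j back to 2*j.
--     list_of_indices = []
--     for j, ch in enumerate(target_string[::2]):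
--         if ch in 'AEIOU':
--             list_of_indices.append(2 * j)
--     return list_of_indices
-- ===== Notes on version B (the rewrite author's own statement) =====
-- stated objective: alternative
-- what changed: B slices out the even-position subsequence (target_string[::2]) and enumerates only that half, appending 2*j for vowels, instead of A's full scan with an index counter and a parity test on every character.
import Mathlib
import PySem

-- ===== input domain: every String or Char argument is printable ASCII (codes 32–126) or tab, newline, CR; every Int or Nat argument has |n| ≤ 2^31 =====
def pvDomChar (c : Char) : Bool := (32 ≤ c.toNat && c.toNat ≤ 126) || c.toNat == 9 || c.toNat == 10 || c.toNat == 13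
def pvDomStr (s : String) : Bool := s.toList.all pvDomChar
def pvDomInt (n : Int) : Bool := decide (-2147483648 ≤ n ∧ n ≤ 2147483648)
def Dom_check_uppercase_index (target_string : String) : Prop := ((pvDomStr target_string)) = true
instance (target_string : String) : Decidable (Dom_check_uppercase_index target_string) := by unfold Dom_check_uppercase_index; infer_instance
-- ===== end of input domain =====

-- B visits only the even positions (the [::2] slice) and appends 2*j for vowels, instead of
-- A's full scan with an index counter and a parity test on every character; objective: alternative.

-- ===== PORT A =====
def check_uppercase_index (target_string : String) : List Int :=
  let uppercase_vowels := "AEIOU"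
  let st := target_string.toList.foldl
    (fun (st : Int × List Int) i =>
      (st.1 + 1,
       if PySem.Chars.isIn [i] uppercase_vowels.toList && (PySem.Int.mod st.1 2 == 0)
       then st.2 ++ [st.1] else st.2))
    (0, [])
  st.2

-- ===== PORT B =====
def check_uppercase_index_alt (target_string : String) : List Int :=
  let evens := (PySem.Str.slice? target_string none none 2).getD ""  -- slice with step ≠ 0 always succeeds
  (PySem.List.enumerate evens.toList 0).foldl
    (fun acc p => if PySem.Chars.isIn [p.2] ("AEIOU".toList) then acc ++ [2 * p.1] else acc) []

-- ===== PRECONDITION & SPEC =====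
def Spec_check_uppercase_index (target_string : String) (out : List Int) : Prop := out = check_uppercase_index_alt target_string
instance (target_string : String) (out : List Int) : Decidable (Spec_check_uppercase_index target_string out) := by unfold Spec_check_uppercase_index; infer_instance

-- ===== CLAIM (what is proved, stated in full; the proofs are below) =====
def Claim_equal_check_uppercase_index : Prop := ∀ (target_string : String), Dom_check_uppercase_index target_string → Spec_check_uppercase_index target_string (check_uppercase_index target_string)

-- ===== LEMMAS AND PROOFS =====

-- reference recursion for A's loop: emit t when the char is a vowel and t is even, then t+1
def pvG (cs : List Char) (t : Int) : List Int :=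
  match cs with
  | [] => []
  | c :: cs =>
    (if PySem.Chars.isIn [c] ("AEIOU".toList) && (PySem.Int.mod t 2 == 0) then [t] else [])
      ++ pvG cs (t + 1)

-- reference recursion for B's loop over the even-position subsequence
def pvH (es : List Char) (j : Int) : List Int :=
  match es with
  | [] => []
  | c :: es =>
    (if PySem.Chars.isIn [c] ("AEIOU".toList) then [2 * j] else []) ++ pvH es (j + 1)

-- the even-position subsequence, structurally
def pvEvens {α : Type} : List α → List α
  | [] => []
  | [c] => [c]
  | c :: _ :: cs => c :: pvEvens cs

theorem pvA_foldl (cs : List Char) (t : Int) (acc : List Int) :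
    (cs.foldl
      (fun (st : Int × List Int) i =>
        (st.1 + 1,
         if PySem.Chars.isIn [i] ("AEIOU".toList) && (PySem.Int.mod st.1 2 == 0)
         then st.2 ++ [st.1] else st.2))
      (t, acc)).2 = acc ++ pvG cs t := by
  induction cs generalizing t acc with
  | nil => simp [pvG]
  | cons c cs ih =>
    simp only [List.foldl_cons, pvG, ih]
    split <;> simp

theorem pvB_foldl (es : List Char) (j : Int) (acc : List Int) :
    ((PySem.List.enumerate es j).foldl
      (fun acc p => if PySem.Chars.isIn [p.2] ("AEIOU".toList) then acc ++ [2 * p.1] else acc)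
      acc) = acc ++ pvH es j := by
  induction es generalizing j acc with
  | nil => simp [pvH, PySem.List.enumerate]
  | cons c es ih =>
    rw [PySem.List.enumerate_cons]
    simp only [List.foldl_cons, pvH, ih]
    split <;> simp

theorem pvMod_even (j : Int) : PySem.Int.mod (2 * j) 2 = 0 := by
  simp [PySem.Int.mod, Int.fmod_eq_emod_of_nonneg, Int.mul_emod_right]

theorem pvMod_odd (j : Int) : PySem.Int.mod (2 * j + 1) 2 = 1 := by
  simp [PySem.Int.mod, Int.fmod_eq_emod_of_nonneg]

theorem pvG_eq_pvH (cs : List Char) (j : Int) : pvG cs (2 * j) = pvH (pvEvens cs) j := by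
  induction cs using pvEvens.induct generalizing j with
  | case1 => simp [pvG, pvEvens, pvH]
  | case2 c => simp [pvG, pvEvens, pvH]
  | case3 c d cs ih =>
    have h1 : PySem.Int.mod (2 * j) 2 = 0 := pvMod_even j
    have h2 : PySem.Int.mod (2 * j + 1) 2 = 1 := pvMod_odd j
    have h3 : 2 * j + 1 + 1 = 2 * (j + 1) := by ring
    simp only [pvG, pvEvens, pvH, h1, h2, h3, ih]
    simp

theorem pvSlice2 {α : Type} (xs : List α) :
    PySem.List.slice? xs none none 2 =
      some (List.filterMap (fun k : Nat => xs[2*k]?) (List.range ((xs.length+1)/2))) := by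
  simp only [PySem.List.slice?, PySem.List.sliceIndices]
  norm_num
  have hc : (if 0 < xs.length then (((xs.length : Int) + 2 - 1) / 2).toNat else 0)
      = (xs.length + 1) / 2 := by
    split
    · have h : ((xs.length : Int) + 2 - 1) = ((xs.length + 1 : Nat) : Int) := by push_cast; ring
      rw [h, show ((2:Int)) = ((2:Nat):Int) from rfl, ← Int.natCast_div, Int.toNat_natCast]
    · omega
  rw [hc]
  exact List.filterMap_congr (fun k _ => by rw [show ((2 * (k:Int)).toNat) = 2 * k by omega])

theorem pvFilterMapEvens {α : Type} (xs : List α) :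
    List.filterMap (fun k : Nat => xs[2*k]?) (List.range ((xs.length+1)/2)) = pvEvens xs := by
  induction xs using pvEvens.induct with
  | case1 => simp [pvEvens]
  | case2 c => simp [pvEvens]
  | case3 c d cs ih =>
    have hl : ((c :: d :: cs).length + 1) / 2 = (cs.length + 1) / 2 + 1 := by
      simp [List.length_cons]; omega
    rw [hl, List.range_succ_eq_map, List.filterMap_cons, List.filterMap_map]
    have hf : ∀ k : Nat, (c :: d :: cs)[2 * Nat.succ k]? = cs[2*k]? := by
      intro k
      rw [show 2 * Nat.succ k = (2*k) + 1 + 1 by omega]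
      simp
    simp only [Function.comp_def, hf]
    simp [pvEvens, ih]

-- ===== VERDICT (by name: the statement is the Claim_ definition above) =====
theorem check_uppercase_index_spec : Claim_equal_check_uppercase_index := by
  intro s _
  show check_uppercase_index s = check_uppercase_index_alt s
  unfold check_uppercase_index check_uppercase_index_alt
  simp only [PySem.Str.slice?, PySem.Chars.slice?_eq_listSlice?, pvSlice2,
    Option.map_some, Option.getD_some]
  rw [pvB_foldl, pvA_foldl]
  simp only [List.nil_append]
  rw [show (String.ofList (List.filterMap (fun k : Nat => s.toList[2*k]?)
        (List.range ((s.toList.length+1)/2)))).toList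
      = List.filterMap (fun k : Nat => s.toList[2*k]?) (List.range ((s.toList.length+1)/2))
    from by simp]
  rw [pvFilterMapEvens]
  have := pvG_eq_pvH s.toList 0
  simpa using this
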